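-- pv_equiv track=rewrite | github.com/elsaferati/Primex-TaskManager | backend/app/api/routers/exports.py | _month_cycle_labels
-- ===== SOURCE A (Python) =====
-- _MONTH_LABELS = ["Jan", "Feb", "Mar", "Apr", "May", "Jun", "Jul", "Aug", "Sep", "Oct", "Nov", "Dec"]
--
-- def _month_cycle_labels(start_month: int, interval: int) -> list[str]:
--     if start_month < 1 or start_month > 12 or interval <= 0:
--         return []
--     steps = 12 // interval
--     labels: list[str] = []
--     for i in range(steps):
--         month = ((start_month - 1 + (interval * i)) % 12) + 1
--         labels.append(_MONTH_LABELS[month - 1])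
--     return labels
-- ===== SOURCE B (Python) =====
-- _MONTH_LABELS = ["Jan", "Feb", "Mar", "Apr", "May", "Jun", "Jul", "Aug", "Sep", "Oct", "Nov", "Dec"]
--
-- def _month_cycle_labels(start_month: int, interval: int) -> list[str]:
--     if start_month < 1 or start_month > 12 or interval <= 0:
--         return []
--     steps = 12 // interval
--     return (_MONTH_LABELS * 2)[start_month - 1 : start_month - 1 + interval * steps : interval]
-- ===== Notes on version B (the rewrite author's own statement) =====
-- stated objective: simpler
-- what changed: Replaces the per-step modulo-and-append loop with a single strided slice of the doubled month-label list, which makes every needed index valid without any wraparound arithmetic.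
import Mathlib
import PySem

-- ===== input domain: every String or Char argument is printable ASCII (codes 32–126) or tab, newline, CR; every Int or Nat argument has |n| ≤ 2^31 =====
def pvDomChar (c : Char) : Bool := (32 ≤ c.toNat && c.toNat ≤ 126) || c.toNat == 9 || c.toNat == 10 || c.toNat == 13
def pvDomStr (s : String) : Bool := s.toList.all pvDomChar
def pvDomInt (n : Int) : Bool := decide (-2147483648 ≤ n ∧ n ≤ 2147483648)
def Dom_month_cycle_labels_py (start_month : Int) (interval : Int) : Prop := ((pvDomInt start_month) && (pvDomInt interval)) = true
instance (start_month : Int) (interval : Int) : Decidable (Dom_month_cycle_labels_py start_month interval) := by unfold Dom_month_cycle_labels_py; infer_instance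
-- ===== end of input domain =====

-- B replaces A's per-step modulo/append loop by one strided slice of the doubled label list (objective: simpler).

def pvMonthLabels : List String :=
  ["Jan", "Feb", "Mar", "Apr", "May", "Jun", "Jul", "Aug", "Sep", "Oct", "Nov", "Dec"]

-- ===== PORT A =====
def month_cycle_labels_py (start_month : Int) (interval : Int) : List String :=
  if start_month < 1 ∨ 12 < start_month ∨ interval ≤ 0 then []
  else
    let steps := PySem.Int.floordiv 12 interval
    (PySem.List.pyRange 0 steps 1).foldl
      (fun labels i =>
        let month := PySem.Int.mod (start_month - 1 + interval * i) 12 + 1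
        -- index month-1 is always within 0..11, so the IndexError default is never used
        labels ++ [PySem.List.pyGetD pvMonthLabels (month - 1) ""]) []

-- ===== PORT B =====
def month_cycle_labels_py_alt (start_month : Int) (interval : Int) : List String :=
  if start_month < 1 ∨ 12 < start_month ∨ interval ≤ 0 then []
  else
    let steps := PySem.Int.floordiv 12 interval
    -- slice? is none only for step = 0; here interval > 0, so getD [] is exact
    (PySem.List.slice? (pvMonthLabels ++ pvMonthLabels) (some (start_month - 1))
      (some (start_month - 1 + interval * steps)) interval).getD []

-- ===== PRECONDITION & SPEC =====
def Spec_month_cycle_labels_py (start_month : Int) (interval : Int) (out : List String) : Prop := out = month_cycle_labels_py_alt start_month interval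
instance (start_month : Int) (interval : Int) (out : List String) : Decidable (Spec_month_cycle_labels_py start_month interval out) := by unfold Spec_month_cycle_labels_py; infer_instance

-- ===== CLAIM (what is proved, stated in full; the proofs are below) =====
def Claim_equal_month_cycle_labels_py : Prop := ∀ (start_month : Int) (interval : Int), Dom_month_cycle_labels_py start_month interval → Spec_month_cycle_labels_py start_month interval (month_cycle_labels_py start_month interval)

-- ===== LEMMAS AND PROOFS =====

-- an empty-range strided slice is empty
theorem pv_slice_empty (xs : List String) (a step : Int) (h : 0 < step) :
    PySem.List.slice? xs (some a) (some a) step = some [] := by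
  simp [PySem.List.slice?, PySem.List.sliceIndices, h, Int.ne_of_gt h]

-- for interval > 12, 12 // interval = 0
theorem pv_floordiv_big (i : Int) (h : 12 < i) : PySem.Int.floordiv 12 i = 0 := by
  rw [PySem.Int.floordiv_eq_iff_of_pos (by omega)]
  omega

-- ===== VERDICT (by name: the statement is the Claim_ definition above) =====
theorem month_cycle_labels_py_spec : Claim_equal_month_cycle_labels_py := by
  intro s i _
  unfold Spec_month_cycle_labels_py
  by_cases hg : s < 1 ∨ 12 < s ∨ i ≤ 0
  · simp [month_cycle_labels_py, month_cycle_labels_py_alt, hg]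
  · have hs1 : 1 ≤ s := by omega
    have hs2 : s ≤ 12 := by omega
    have hi : 0 < i := by omega
    by_cases hile : i ≤ 12
    · interval_cases s <;> interval_cases i <;> decide
    · have h0 : PySem.Int.floordiv 12 i = 0 := pv_floordiv_big i (by omega)
      simp [month_cycle_labels_py, month_cycle_labels_py_alt, hg, h0,
        PySem.List.pyRange_one_eq_nil (by omega : (0:Int) ≤ 0),
        pv_slice_empty _ _ _ hi]
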